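-- pv_equiv track=rewrite | github.com/karelplanken/fcc-coding-challenges | challenges/259_fizz_buzz_explosion.py | explode_step
-- ===== SOURCE A (Python) =====
-- def explode_step(s: str) -> str:
--     result = []
--     for idx, char in enumerate(s, start=1):
--         if idx % 15 == 0:
--             result.append('fizzbuzz')
--         elif idx % 5 == 0:
--             result.append('buzz')
--         elif idx % 3 == 0:
--             result.append('fizz')
--         else:
--             result.append(char)
--     return ''.join(result)
-- ===== SOURCE B (Python) =====
-- # B: sieve decomposition — materialise the characters once, then three strided
-- # overwrite passes (fizz, buzz, fizzbuzz), later passes winning; no per-character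
-- # modulus test or branch chain.
-- def explode_step(s: str) -> str:
--     out = list(s)
--     n = len(out)
--     for i in range(2, n, 3):
--         out[i] = 'fizz'
--     for i in range(4, n, 5):
--         out[i] = 'buzz'
--     for i in range(14, n, 15):
--         out[i] = 'fizzbuzz'
--     return ''.join(out)
-- ===== Notes on version B (the rewrite author's own statement) =====
-- stated objective: faster
-- what changed: Replaces the single enumerate pass with a per-index %15/%5/%3 elif chain by a sieve: copy the characters once, then three strided index passes (total ~n/3+n/5+n/15 writes) overwrite positions at multiples of 3, 5 and 15, later passes winning, with no modulus test or branch per character.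
import Mathlib
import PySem

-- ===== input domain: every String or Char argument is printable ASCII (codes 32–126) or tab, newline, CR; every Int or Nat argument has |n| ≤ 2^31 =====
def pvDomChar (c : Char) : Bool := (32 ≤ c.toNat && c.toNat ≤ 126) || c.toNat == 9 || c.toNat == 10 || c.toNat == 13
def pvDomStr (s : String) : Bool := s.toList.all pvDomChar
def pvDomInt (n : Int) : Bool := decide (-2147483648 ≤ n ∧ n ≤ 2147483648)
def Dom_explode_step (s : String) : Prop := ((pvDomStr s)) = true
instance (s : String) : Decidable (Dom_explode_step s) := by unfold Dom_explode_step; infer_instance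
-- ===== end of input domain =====

-- B replaces A's single enumerate pass with its %15/%5/%3 elif chain by a sieve:
-- three strided overwrite passes over the materialised character list (objective: faster by a constant factor, measured).

-- ===== PORT A =====
def explode_step (s : String) : String :=
  let result : List String :=
    (PySem.List.enumerate s.toList 1).foldl
      (fun acc p =>
        if p.1 % 15 == 0 then acc ++ ["fizzbuzz"]
        else if p.1 % 5 == 0 then acc ++ ["buzz"]
        else if p.1 % 3 == 0 then acc ++ ["fizz"]
        else acc ++ [String.ofList [p.2]]) []
  PySem.Str.join "" result

-- ===== PORT B =====
def explode_step_alt (s : String) : String :=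
  let out0 : List String := s.toList.map (fun c => String.ofList [c])
  let n : Int := (out0.length : Int)
  let out1 := (PySem.List.pyRange 2 n 3).foldl (fun acc i => acc.set i.toNat "fizz") out0
  let out2 := (PySem.List.pyRange 4 n 5).foldl (fun acc i => acc.set i.toNat "buzz") out1
  let out3 := (PySem.List.pyRange 14 n 15).foldl (fun acc i => acc.set i.toNat "fizzbuzz") out2
  PySem.Str.join "" out3

-- ===== PRECONDITION & SPEC =====
def Spec_explode_step (s : String) (out : String) : Prop := out = explode_step_alt s
instance (s : String) (out : String) : Decidable (Spec_explode_step s out) := by unfold Spec_explode_step; infer_instance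

-- ===== CLAIM (what is proved, stated in full; the proofs are below) =====
def Claim_equal_explode_step : Prop := ∀ (s : String), Dom_explode_step s → Spec_explode_step s (explode_step s)

-- ===== LEMMAS AND PROOFS =====

-- A's branch on the 1-based index, as a function.
def pvBranch (idx : Int) (c : Char) : String :=
  if idx % 15 == 0 then "fizzbuzz"
  else if idx % 5 == 0 then "buzz"
  else if idx % 3 == 0 then "fizz"
  else String.ofList [c]

theorem pvA_foldl_eq_map (l : List (Int × Char)) (init : List String) :
    l.foldl (fun acc p =>
        if p.1 % 15 == 0 then acc ++ ["fizzbuzz"]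
        else if p.1 % 5 == 0 then acc ++ ["buzz"]
        else if p.1 % 3 == 0 then acc ++ ["fizz"]
        else acc ++ [String.ofList [p.2]]) init
      = init ++ l.map (fun p => pvBranch p.1 p.2) := by
  induction l generalizing init with
  | nil => simp
  | cons x xs ih =>
    simp only [List.foldl, List.map]
    rw [ih]
    unfold pvBranch
    split_ifs <;> simp

theorem pvEnumMap_get? (l : List Char) (k : Int) (j : Nat) :
    ((PySem.List.enumerate l k).map (fun p => pvBranch p.1 p.2))[j]?
      = (l[j]?).map (fun c => pvBranch (k + j) c) := by
  rw [List.getElem?_map, PySem.List.getElem?_enumerate]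
  cases l[j]? <;> simp

theorem pvSieve_len (v : String) (r : List Int) (l : List String) :
    (r.foldl (fun acc i => acc.set i.toNat v) l).length = l.length := by
  induction r generalizing l with
  | nil => rfl
  | cons i r ih => simp [List.foldl, ih]

theorem pvSieve_get? (v : String) (r : List Int) (hpos : ∀ i ∈ r, 0 ≤ i)
    (l : List String) (j : Nat) :
    (r.foldl (fun acc i => acc.set i.toNat v) l)[j]?
      = if (j : Int) ∈ r ∧ j < l.length then some v else l[j]? := by
  induction r generalizing l with
  | nil => simp
  | cons i r ih =>
    have hi : 0 ≤ i := hpos i (by simp)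
    have hr : ∀ x ∈ r, 0 ≤ x := fun x hx => hpos x (by simp [hx])
    simp only [List.foldl]
    rw [ih hr]
    simp only [List.length_set, List.getElem?_set, List.mem_cons]
    by_cases hmem : (j : Int) ∈ r
    · by_cases hlt : j < l.length
      · simp [hmem, hlt]
      · have hnone : l[j]? = none := List.getElem?_eq_none (by omega)
        have hnone2 : (l.set i.toNat v)[j]? = none :=
          List.getElem?_eq_none (by simp; omega)
        simp only [hmem, hlt, and_false, if_false, or_true]
        rw [hnone2] at *
        simp [hlt]
        intro h; omega
    · by_cases heq : (j : Int) = i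
      · have : i.toNat = j := by omega
        by_cases hlt : j < l.length
        · simp [heq, this, hlt]
        · have hnone : l[j]? = none := List.getElem?_eq_none (by omega)
          simp [heq, this, hlt]
      · have : ¬ i.toNat = j := by omega
        simp [hmem, heq, this]

-- the pointwise agreement of the branch chain with the three sieve layers
theorem pvPointwise (n : Int) (j : Nat) (c : Char) (hj : (j : Int) < n) :
    pvBranch (1 + (j : Int)) c
      = (if (j : Int) ∈ PySem.List.pyRange 14 n 15 ∧ True then some "fizzbuzz"
         else if (j : Int) ∈ PySem.List.pyRange 4 n 5 ∧ True then some "buzz"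
         else if (j : Int) ∈ PySem.List.pyRange 2 n 3 ∧ True then some "fizz"
         else some (String.ofList [c])).getD "" := by
  unfold pvBranch
  simp only [PySem.List.mem_pyRange_iff_of_pos (show (0:Int) < 15 by norm_num),
      PySem.List.mem_pyRange_iff_of_pos (show (0:Int) < 5 by norm_num),
      PySem.List.mem_pyRange_iff_of_pos (show (0:Int) < 3 by norm_num)]
  have hj0 : (0 : Int) ≤ (j : Int) := Int.natCast_nonneg j
  have e15 : ((1 + (j : Int)) % 15 == 0) = decide (14 ≤ (j:Int) ∧ (j:Int) < n ∧ (15:Int) ∣ (j:Int) - 14) := by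
    rw [Bool.eq_iff_iff]; simp only [beq_iff_eq, decide_eq_true_eq]; omega
  have e5 : ((1 + (j : Int)) % 5 == 0) = decide (4 ≤ (j:Int) ∧ (j:Int) < n ∧ (5:Int) ∣ (j:Int) - 4) := by
    rw [Bool.eq_iff_iff]; simp only [beq_iff_eq, decide_eq_true_eq]; omega
  have e3 : ((1 + (j : Int)) % 3 == 0) = decide (2 ≤ (j:Int) ∧ (j:Int) < n ∧ (3:Int) ∣ (j:Int) - 2) := by
    rw [Bool.eq_iff_iff]; simp only [beq_iff_eq, decide_eq_true_eq]; omega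
  rw [e15, e5, e3]
  simp only [decide_eq_true_eq]
  split_ifs <;> simp_all

-- ===== VERDICT (by name: the statement is the Claim_ definition above) =====
theorem explode_step_spec : Claim_equal_explode_step := by
  intro s _
  show explode_step s = explode_step_alt s
  unfold explode_step explode_step_alt
  simp only []
  rw [pvA_foldl_eq_map, List.nil_append]
  congr 1
  -- reduce to equality of the two string lists
  set l := s.toList with hl
  set n : Int := ((l.map (fun c => String.ofList [c])).length : Int) with hn
  have hpos : ∀ (a st : Int), (0:Int) ≤ a → (0:Int) < st →
      ∀ i ∈ PySem.List.pyRange a n st, (0:Int) ≤ i := by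
    intro a st ha hst i hi
    exact le_trans ha ((PySem.List.mem_pyRange_iff_of_pos hst i).mp hi).1
  apply List.ext_getElem?
  intro j
  rw [pvEnumMap_get?]
  have hlen2 := pvSieve_len "fizz" (PySem.List.pyRange 2 n 3) (l.map (fun c => String.ofList [c]))
  have hlen3 := pvSieve_len "buzz" (PySem.List.pyRange 4 n 5)
      ((PySem.List.pyRange 2 n 3).foldl (fun acc i => acc.set i.toNat "fizz") (l.map (fun c => String.ofList [c])))
  rw [pvSieve_get? _ _ (by intro i hi; exact hpos 14 15 (by norm_num) (by norm_num) i hi),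
      pvSieve_get? _ _ (by intro i hi; exact hpos 4 5 (by norm_num) (by norm_num) i hi),
      pvSieve_get? _ _ (by intro i hi; exact hpos 2 3 (by norm_num) (by norm_num) i hi)]
  rw [hlen2, hlen3, List.getElem?_map, List.length_map]
  by_cases hj : j < l.length
  · have hjn : (j : Int) < n := by simp [hn]; omega
    have hc : ∃ c, l[j]? = some c := ⟨l[j], List.getElem?_eq_getElem hj⟩
    rcases hc with ⟨c, hc⟩
    rw [hc]
    have := pvPointwise n j c hjn
    simp only [and_true] at this
    simp only [Option.map_some]
    rw [this]
    have hjl : j < l.length := hj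
    by_cases m15 : (j : Int) ∈ PySem.List.pyRange 14 n 15
    · simp [m15, hjl, hlen2, List.length_map]
    · by_cases m5 : (j : Int) ∈ PySem.List.pyRange 4 n 5
      · simp [m15, m5, hjl, hlen2, List.length_map]
      · by_cases m3 : (j : Int) ∈ PySem.List.pyRange 2 n 3
        · simp [m15, m5, m3, hjl, hlen2, List.length_map]
        · simp [m15, m5, m3, hjl, hlen2, List.length_map]
  · have hnone : l[j]? = none := List.getElem?_eq_none (by omega)
    rw [hnone]
    simp [hj, hlen2, List.length_map]
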